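-- pv_equiv track=rewrite | github.com/ldct/cp | codeforces/G9/C/C.py | ans_slow
-- ===== SOURCE A (Python) =====
-- from collections import deque
--
-- def descendents(A):
--     for i in range(len(A)-1):
--         if A[i] < A[i+1]:
--             A1 = A[:]
--             A2 = A[:]
--
--             del A1[i]
--             del A2[i+1]
--
--             return [A1, A2]
--     return []
--
-- def ans_slow(A):
--     work = deque([A])
--
--     while len(work):
--         A = work.popleft()
--         if len(A) == 1:
--             return "YES"
--         for B in descendents(A):
--             work.append(B)
--
--     return "NO"
-- ===== SOURCE B (Python) =====
-- def ans_slow(A):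
--     if len(A) == 1:
--         return "YES"
--     if A and A[0] < A[-1]:
--         return "YES"
--     return "NO"
-- ===== Notes on version B (the rewrite author's own statement) =====
-- stated objective: faster
-- what changed: Replaced the branching BFS over leftmost-ascent deletions by the proved closed-form reachability criterion: length 1, or first element strictly less than last.
import Mathlib
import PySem

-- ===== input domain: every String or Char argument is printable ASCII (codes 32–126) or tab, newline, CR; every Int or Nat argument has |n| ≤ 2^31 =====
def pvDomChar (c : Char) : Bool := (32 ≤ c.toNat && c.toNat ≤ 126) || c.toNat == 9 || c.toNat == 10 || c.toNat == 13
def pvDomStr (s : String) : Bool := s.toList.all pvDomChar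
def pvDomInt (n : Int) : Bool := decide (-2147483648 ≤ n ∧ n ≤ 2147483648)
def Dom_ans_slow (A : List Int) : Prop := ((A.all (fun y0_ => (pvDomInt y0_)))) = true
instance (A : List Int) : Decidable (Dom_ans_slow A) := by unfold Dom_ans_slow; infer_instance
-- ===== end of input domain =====

-- B replaces A's branching BFS over leftmost-ascent deletions by the closed-form
-- reachability criterion (length 1, or first element < last element): asymptotically faster.

-- ===== PORT A =====
-- Python's `for i in range(len(A)-1): … return …` with early return, as a recursion on i.
def descGo (A : List Int) (i : Nat) : List (List Int) :=
  if h : i + 1 < A.length then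
    if A[i] < A[i+1] then [A.eraseIdx i, A.eraseIdx (i+1)]
    else descGo A (i+1)
  else []
termination_by A.length - i
decreasing_by exact Nat.sub_succ_lt_self A.length i (Nat.lt_of_succ_lt h)

def descendents (A : List Int) : List (List Int) := descGo A 0

-- the BFS while-loop over the deque (popleft from the front, children appended at the back);
-- the fuel parameter only makes the loop total: 3 ^ |A| steps are proved sufficient below (bfsFuel_eq)
def bfsFuel : Nat → List (List Int) → String
  | _, [] => "NO"
  | 0, _ :: _ => "NO"
  | n + 1, A :: rest =>
    if A.length = 1 then "YES"
    else bfsFuel n (rest ++ descendents A)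

def ans_slow (A : List Int) : String := bfsFuel (3 ^ A.length) [A]

-- ===== PORT B =====
def ans_slow_alt (A : List Int) : String :=
  if A.length = 1 then "YES"
  else
    match A.head?, A.getLast? with
    | some x, some y => if x < y then "YES" else "NO"
    | _, _ => "NO"

-- ===== PRECONDITION & SPEC =====
def Spec_ans_slow (A : List Int) (out : String) : Prop := out = ans_slow_alt A
instance (A : List Int) (out : String) : Decidable (Spec_ans_slow A out) := by unfold Spec_ans_slow; infer_instance

-- ===== CLAIM (what is proved, stated in full; the proofs are below) =====
def Claim_equal_ans_slow : Prop := ∀ (A : List Int), Dom_ans_slow A → Spec_ans_slow A (ans_slow A)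

-- ===== LEMMAS AND PROOFS =====

-- B answers "YES" exactly when: length 1, or nonempty with first < last.
theorem altYes_iff (A : List Int) :
    ans_slow_alt A = "YES" ↔
      (A.length = 1 ∨ ∃ h : 0 < A.length, A[0] < A[A.length - 1]) := by
  unfold ans_slow_alt
  by_cases h1 : A.length = 1
  · simp [h1]
  · rw [if_neg h1]
    cases A with
    | nil => simp
    | cons x xs =>
      rw [List.getLast?_eq_getElem?,
        List.getElem?_eq_getElem (Nat.sub_lt (by simp) (by norm_num))]
      simp only [List.head?_cons]
      constructor
      · intro hy
        have hy' : (if x < (x :: xs)[(x :: xs).length - 1] then "YES" else "NO") = "YES" := hy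
        refine Or.inr ⟨by simp, ?_⟩
        simp only [List.getElem_cons_zero]
        split at hy'
        · assumption
        · exact absurd hy' (by decide)
      · rintro (h | ⟨h0, hlt⟩)
        · exact absurd h h1
        · show (if x < (x :: xs)[(x :: xs).length - 1] then "YES" else "NO") = "YES"
          rw [if_pos (by simpa using hlt)]

theorem alt_no_of_not_yes (A : List Int) (h : ¬ ans_slow_alt A = "YES") :
    ans_slow_alt A = "NO" := by
  unfold ans_slow_alt at *
  split at h
  · simp at h
  · rcases hm : A.head? with _ | x <;> rcases hm2 : A.getLast? with _ | y <;>
      simp_all <;> split at h <;> simp_all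

-- first-ascent characterisation of descendents
theorem descGo_spec (A : List Int) (i : Nat) :
    (descGo A i = [] ∧ ∀ j, i ≤ j → ∀ h : j + 1 < A.length, ¬ A[j] < A[j+1])
    ∨ (∃ k, ∃ h : k + 1 < A.length, i ≤ k ∧ A[k] < A[k+1]
        ∧ (∀ j, i ≤ j → j < k → ∀ h2 : j + 1 < A.length, ¬ A[j] < A[j+1])
        ∧ descGo A i = [A.eraseIdx k, A.eraseIdx (k+1)]) := by
  fun_induction descGo A i with
  | case1 i h hlt =>
    exact Or.inr ⟨i, h, le_refl i, hlt, fun j h1 h2 => by omega, rfl⟩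
  | case2 i h hlt ih =>
    rcases ih with ⟨he, hall⟩ | ⟨k, hk, hik, hklt, hpre, heq⟩
    · refine Or.inl ⟨he, ?_⟩
      intro j hij hj1
      by_cases hji : j = i
      · subst hji; exact hlt
      · exact hall j (by omega) hj1
    · refine Or.inr ⟨k, hk, by omega, hklt, ?_, heq⟩
      intro j hij hjk hj1
      by_cases hji : j = i
      · subst hji; exact hlt
      · exact hpre j (by omega) hjk hj1
  | case3 i h =>
    refine Or.inl ⟨rfl, ?_⟩
    intro j hij hj1
    omega

-- a chain of non-ascents forces A[b] ≤ A[a] for a ≤ b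
theorem chain_le (A : List Int) (k : Nat)
    (hk : ∀ j, j < k → ∀ h2 : j + 1 < A.length, ¬ A[j] < A[j+1]) :
    ∀ b, ∀ hb : b < A.length, b ≤ k → ∀ a, ∀ hab : a ≤ b,
      A[b] ≤ A[a]'(Nat.lt_of_le_of_lt hab hb) := by
  intro b
  induction b with
  | zero =>
    intro hb _ a hab
    have : a = 0 := by omega
    subst this; exact le_refl _
  | succ b ih =>
    intro hb hbk a hab
    by_cases ha : a = b + 1
    · subst ha; exact le_refl _
    · have h1 : A[b+1] ≤ A[b]'(by omega) := by
        have := hk b (by omega) (by omega)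
        omega
      exact le_trans h1 (ih (by omega) (by omega) a (by omega))

-- the key step: for length ≠ 1, A is good iff some child is good
theorem key (A : List Int) (hne : A.length ≠ 1) :
    ans_slow_alt A = "YES" ↔ ∃ B ∈ descendents A, ans_slow_alt B = "YES" := by
  rcases descGo_spec A 0 with ⟨he, hall⟩ | ⟨k, hk, -, hlt, hpre, heq⟩
  · unfold descendents
    rw [he]
    constructor
    · intro hy
      rcases (altYes_iff A).mp hy with h | ⟨h0, hfl⟩
      · exact absurd h hne
      · have hle := chain_le A A.length (fun j hj h2 => hall j (by omega) h2)
          (A.length - 1) (by omega) (by omega) 0 (by omega)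
        exact absurd hfl (not_lt.mpr hle)
    · rintro ⟨B, hB, -⟩
      simp at hB
  · unfold descendents
    rw [heq]
    have hklen : k < A.length := by omega
    have hlen1 : (A.eraseIdx k).length = A.length - 1 := by
      simp [List.length_eraseIdx, hklen]
    have hlen2 : (A.eraseIdx (k+1)).length = A.length - 1 := by
      simp [List.length_eraseIdx, hk]
    have hmem : ∀ P : List Int → Prop,
        (∃ B ∈ [A.eraseIdx k, A.eraseIdx (k+1)], P B) ↔ P (A.eraseIdx k) ∨ P (A.eraseIdx (k+1)) := by
      intro P; simp
    rw [hmem]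
    by_cases hn2 : A.length = 2
    · -- length-2 case: both sides hold
      have hk0 : k = 0 := by omega
      subst hk0
      constructor
      · intro _
        exact Or.inl ((altYes_iff _).mpr (Or.inl (by omega)))
      · intro _
        refine (altYes_iff A).mpr (Or.inr ⟨by omega, ?_⟩)
        simp only [show A.length - 1 = 0 + 1 from by omega]
        exact hlt
    · have hn3 : 3 ≤ A.length := by omega
      have hc1last : (A.eraseIdx k)[A.length - 1 - 1]'(by omega) = A[A.length - 1]'(by omega) := by
        rw [List.getElem_eraseIdx, dif_neg (by omega)]
        simp only [show A.length - 1 - 1 + 1 = A.length - 1 from by omega]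
      have hc2head : (A.eraseIdx (k+1))[0]'(by omega) = A[0]'(by omega) := by
        rw [List.getElem_eraseIdx, dif_pos (by omega)]
      constructor
      · intro hy
        rcases (altYes_iff A).mp hy with h | ⟨h0, hfl⟩
        · exact absurd h hne
        · by_cases hk0 : k = 0
          · -- use the second child (erase k+1): head A[0], last A[len-1]
            refine Or.inr ((altYes_iff _).mpr (Or.inr ⟨by omega, ?_⟩))
            simp only [hlen2]
            rw [hc2head]
            have hc2last : (A.eraseIdx (k+1))[A.length - 1 - 1]'(by omega) = A[A.length - 1]'(by omega) := by
              rw [List.getElem_eraseIdx, dif_neg (by omega)]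
              simp only [show A.length - 1 - 1 + 1 = A.length - 1 from by omega]
            rw [hc2last]
            exact hfl
          · -- k ≥ 1: use the first child (erase k): head A[0], last A[len-1]
            refine Or.inl ((altYes_iff _).mpr (Or.inr ⟨by omega, ?_⟩))
            simp only [hlen1]
            rw [hc1last]
            have hc1head : (A.eraseIdx k)[0]'(by omega) = A[0]'(by omega) := by
              rw [List.getElem_eraseIdx, dif_pos (by omega)]
            rw [hc1head]
            exact hfl
      · intro hy
        refine (altYes_iff A).mpr (Or.inr ⟨by omega, ?_⟩)
        rcases hy with h1 | h2
        · rcases (altYes_iff _).mp h1 with h | ⟨h0, hfl⟩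
          · rw [hlen1] at h; omega
          · simp only [hlen1] at hfl
            rw [hc1last] at hfl
            by_cases hk0 : k = 0
            · subst hk0
              have hc1head : (A.eraseIdx 0)[0]'(by omega) = A[1]'(by omega) := by
                rw [List.getElem_eraseIdx, dif_neg (by omega)]
              rw [hc1head] at hfl
              have hlt' : A[0]'(by omega) < A[1]'(by omega) := hlt
              exact lt_trans hlt' hfl
            · have hc1head : (A.eraseIdx k)[0]'(by omega) = A[0]'(by omega) := by
                rw [List.getElem_eraseIdx, dif_pos (by omega)]
              rw [hc1head] at hfl
              exact hfl
        · rcases (altYes_iff _).mp h2 with h | ⟨h0, hfl⟩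
          · rw [hlen2] at h; omega
          · simp only [hlen2] at hfl
            rw [hc2head] at hfl
            by_cases hklast : k = A.length - 2
            · -- second child ends at A[len-2] = A[k] ≤ A[0]: contradiction
              exfalso
              have hc2last : (A.eraseIdx (k+1))[A.length - 1 - 1]'(by omega) = A[k]'(by omega) := by
                rw [List.getElem_eraseIdx, dif_pos (by omega)]
                simp only [show A.length - 1 - 1 = k from by omega]
              rw [hc2last] at hfl
              have hk1 : 1 ≤ k := by omega
              have hle := chain_le A k (fun j hj h2 => hpre j (by omega) hj h2)
                k (by omega) (by omega) 0 (by omega)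
              exact absurd hfl (not_lt.mpr hle)
            · have hc2last : (A.eraseIdx (k+1))[A.length - 1 - 1]'(by omega) = A[A.length - 1]'(by omega) := by
                rw [List.getElem_eraseIdx, dif_neg (by omega)]
                simp only [show A.length - 1 - 1 + 1 = A.length - 1 from by omega]
              rw [hc2last] at hfl
              exact hfl

-- the queue measure strictly drops at each BFS step
theorem descGo_sum_lt (A : List Int) (i : Nat) :
    ((descGo A i).map (fun l => 3 ^ l.length)).sum < 3 ^ A.length := by
  fun_induction descGo A i with
  | case1 i h hlt =>
    have h1 : i < A.length := by omega
    have h2 : i + 1 < A.length := h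
    simp [List.length_eraseIdx, h1, h2]
    have hp : (0:ℕ) < 3 ^ (A.length - 1) := pow_pos (by norm_num) _
    calc 3 ^ (A.length - 1) + 3 ^ (A.length - 1) = 2 * 3 ^ (A.length - 1) := by ring
      _ < 3 * 3 ^ (A.length - 1) := by omega
      _ = 3 ^ (A.length - 1 + 1) := by ring
      _ = 3 ^ A.length := by congr 1; omega
  | case2 i h hlt ih => exact ih
  | case3 i h => exact pow_pos (by norm_num : (0:ℕ) < 3) A.length

theorem bfsFuel_eq : ∀ (n : Nat) (work : List (List Int)),
    (work.map (fun l => 3 ^ l.length)).sum ≤ n →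
    bfsFuel n work = if ∃ B ∈ work, ans_slow_alt B = "YES" then "YES" else "NO" := by
  intro n
  induction n with
  | zero =>
    intro work hw
    cases work with
    | nil => simp [bfsFuel]
    | cons A rest =>
      exfalso
      have hp : (0:ℕ) < 3 ^ A.length := pow_pos (by norm_num) _
      simp only [List.map_cons, List.sum_cons] at hw
      omega
  | succ n ih =>
    intro work hw
    cases work with
    | nil => simp [bfsFuel]
    | cons A rest =>
      have hstep : bfsFuel (n + 1) (A :: rest)
          = if A.length = 1 then "YES" else bfsFuel n (rest ++ descendents A) := rfl
      by_cases h : A.length = 1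
      · rw [hstep, if_pos h, if_pos ⟨A, by simp, (altYes_iff A).mpr (Or.inl h)⟩]
      · have hb : ((rest ++ descendents A).map (fun l => 3 ^ l.length)).sum ≤ n := by
          have hd := descGo_sum_lt A 0
          simp only [descendents] at *
          simp only [List.map_append, List.sum_append, List.map_cons, List.sum_cons] at hw ⊢
          omega
        rw [hstep, if_neg h, ih (rest ++ descendents A) hb]
        have hiff : (∃ B ∈ rest ++ descendents A, ans_slow_alt B = "YES") ↔
            (∃ B ∈ A :: rest, ans_slow_alt B = "YES") := by
          constructor
          · rintro ⟨B, hB, hy⟩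
            rcases List.mem_append.mp hB with hB | hB
            · exact ⟨B, List.mem_cons_of_mem _ hB, hy⟩
            · exact ⟨A, by simp, (key A h).mpr ⟨B, hB, hy⟩⟩
          · rintro ⟨B, hB, hy⟩
            rcases List.mem_cons.mp hB with rfl | hB
            · rcases (key B h).mp hy with ⟨C, hC, hyC⟩
              exact ⟨C, List.mem_append.mpr (Or.inr hC), hyC⟩
            · exact ⟨B, List.mem_append.mpr (Or.inl hB), hy⟩
        by_cases hc : ∃ B ∈ A :: rest, ans_slow_alt B = "YES"
        · rw [if_pos (hiff.mpr hc), if_pos hc]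
        · rw [if_neg (fun hx => hc (hiff.mp hx)), if_neg hc]

-- ===== VERDICT (by name: the statement is the Claim_ definition above) =====
theorem ans_slow_spec : Claim_equal_ans_slow := by
  intro A _
  unfold Spec_ans_slow ans_slow
  rw [bfsFuel_eq (3 ^ A.length) [A] (by simp)]
  by_cases h : ans_slow_alt A = "YES"
  · simp [h]
  · simp [alt_no_of_not_yes A h]
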